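-- pv_equiv track=rewrite | github.com/rresnic/DI_Bootcamp | Week4/Day2/DailyChallenge/challenge1.py | get_column_words
-- ===== SOURCE A (Python) =====
-- def get_column_words(a_matrix):
--     height = len(a_matrix)
--     width = len(a_matrix[0])
--     col_words = [[] for x in range(width)]
--     for i in range(width):
--         for j in range(height):
--             col_words[i].append(a_matrix[j][i])
--     col_word_list =[]
--     for i in range(width):
--         col_word_list = col_word_list + col_words[i]
--     return col_word_list
-- ===== SOURCE B (Python) =====
-- def get_column_words(a_matrix):
--     width = len(a_matrix[0])
--     out = []
--     rows = a_matrix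
--     for _ in range(width):
--         out += [r[0] for r in rows]
--         rows = [r[1:] for r in rows]
--     return out
-- ===== Notes on version B (the rewrite author's own statement) =====
-- stated objective: alternative
-- what changed: B replaces A's build-a-transpose-table-then-concatenate scheme (nested index loops over a preallocated list-of-lists) by head/tail peeling: width times it emits the heads of all rows and replaces the rows by their tails, with no index arithmetic and no intermediate table.
import Mathlib
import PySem

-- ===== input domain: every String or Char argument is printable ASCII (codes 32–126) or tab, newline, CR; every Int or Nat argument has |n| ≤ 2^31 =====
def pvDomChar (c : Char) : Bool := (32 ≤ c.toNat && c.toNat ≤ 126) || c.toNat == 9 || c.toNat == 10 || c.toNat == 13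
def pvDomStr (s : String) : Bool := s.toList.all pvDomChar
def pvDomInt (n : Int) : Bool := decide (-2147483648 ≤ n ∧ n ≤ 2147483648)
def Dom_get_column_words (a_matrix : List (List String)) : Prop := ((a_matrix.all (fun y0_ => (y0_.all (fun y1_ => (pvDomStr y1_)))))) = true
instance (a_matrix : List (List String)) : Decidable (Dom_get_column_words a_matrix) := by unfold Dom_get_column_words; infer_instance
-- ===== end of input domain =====

-- ===== PORT A =====
-- B replaces A's transpose-table-plus-concatenation by iterative head/tail peeling (objective: alternative, not claimed faster).
def get_column_words (a_matrix : List (List String)) : List String :=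
  let height := a_matrix.length
  let width := (PySem.List.pyGetD a_matrix 0 []).length
  let col_words : List (List String) :=
    (PySem.List.pyRange 0 (width : Int) 1).map (fun _ => [])
  let col_words :=
    (PySem.List.pyRange 0 (width : Int) 1).foldl (fun cw i =>
      (PySem.List.pyRange 0 (height : Int) 1).foldl (fun cw j =>
        PySem.List.pySetD cw i
          (PySem.List.pyGetD cw i [] ++ [PySem.List.pyGetD (PySem.List.pyGetD a_matrix j []) i ""])) cw)
      col_words
  (PySem.List.pyRange 0 (width : Int) 1).foldl (fun acc i => acc ++ PySem.List.pyGetD col_words i []) []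

-- ===== PORT B =====
def get_column_words_alt (a_matrix : List (List String)) : List String :=
  let width := (PySem.List.pyGetD a_matrix 0 []).length
  ((PySem.List.pyRange 0 (width : Int) 1).foldl
    (fun (st : List String × List (List String)) _ =>
      (st.1 ++ st.2.map (fun r => PySem.List.pyGetD r 0 ""),
       st.2.map (fun r => PySem.List.slice r (some 1) none)))
    ([], a_matrix)).1

-- ===== PRECONDITION & SPEC =====
-- Pre_ excludes exactly the inputs where Python A raises IndexError: the empty matrix
-- (a_matrix[0]) and ragged matrices with a row shorter than the first row.
def Pre_get_column_words (a_matrix : List (List String)) : Prop :=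
  a_matrix ≠ [] ∧ ∀ row ∈ a_matrix, (a_matrix.headD []).length ≤ row.length
instance (a_matrix : List (List String)) : Decidable (Pre_get_column_words a_matrix) := by
  unfold Pre_get_column_words; infer_instance
def pvWitness_get_column_words : List (List String) := [["ab", "c"], ["d", "ef"]]
def Spec_get_column_words (a_matrix : List (List String)) (out : List String) : Prop := out = get_column_words_alt a_matrix
instance (a_matrix : List (List String)) (out : List String) : Decidable (Spec_get_column_words a_matrix out) := by unfold Spec_get_column_words; infer_instance

-- ===== CLAIM (what is proved, stated in full; the proofs are below) =====
def Claim_equal_get_column_words : Prop := ∀ (a_matrix : List (List String)), Dom_get_column_words a_matrix → Pre_get_column_words a_matrix → Spec_get_column_words a_matrix (get_column_words a_matrix)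

-- ===== LEMMAS AND PROOFS =====
def pvColOf (m : List (List String)) (i : Int) : List String :=
  m.map (fun row => PySem.List.pyGetD row i "")

-- proof-side model of B's loop: peel k times (heads, then tails)
def pvPeel (rows : List (List String)) : Nat → List String
  | 0 => []
  | k + 1 =>
    rows.map (fun r => PySem.List.pyGetD r 0 "") ++
      pvPeel (rows.map (fun r => PySem.List.slice r (some 1) none)) k

-- B's foldl over any index list of length k computes out ++ pvPeel rows k
theorem pv_foldl_peel (l : List Int) :
    ∀ (out : List String) (rows : List (List String)),
      (l.foldl (fun (st : List String × List (List String)) _ =>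
          (st.1 ++ st.2.map (fun r => PySem.List.pyGetD r 0 ""),
           st.2.map (fun r => PySem.List.slice r (some 1) none))) (out, rows)).1
      = out ++ pvPeel rows l.length := by
  induction l with
  | nil => intro out rows; simp [pvPeel]
  | cons x xs ih =>
    intro out rows
    rw [List.foldl_cons, ih]
    simp [pvPeel, List.append_assoc]

theorem pv_getD_tail (r : List String) (i : Nat) (d : String) :
    r.tail.getD i d = r.getD (i + 1) d := by
  cases r <;> simp [List.getD]

-- peeling = column-major flatMap
theorem pv_peel_flatMap (k : Nat) :
    ∀ m : List (List String),
      pvPeel m k = (List.range k).flatMap (fun i : Nat => pvColOf m (i : Int)) := by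
  induction k with
  | zero => intro m; simp [pvPeel]
  | succ k ih =>
    intro m
    rw [pvPeel, ih, List.range_succ_eq_map, List.flatMap_cons, List.flatMap_map]
    congr 1
    apply List.flatMap_congr
    intro i _
    unfold pvColOf
    rw [List.map_map]
    apply List.map_congr_left
    intro r _
    simp only [Function.comp_apply, PySem.List.slice_from_one, PySem.List.pyGetD_natCast]
    rw [pv_getD_tail, Nat.succ_eq_add_one]

-- the inner j-loop appends column n of m to slot n of the table (no-op when n is out of range)
theorem pv_innerSpec (m : List (List String)) (n : Nat) :
    ∀ cw : List (List String),
      m.foldl (fun acc row =>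
        PySem.List.pySetD acc (n : Int)
          (PySem.List.pyGetD acc (n : Int) [] ++ [PySem.List.pyGetD row (n : Int) ""])) cw
      = PySem.List.pySetD cw (n : Int)
          (PySem.List.pyGetD cw (n : Int) [] ++ pvColOf m (n : Int)) := by
  induction m with
  | nil =>
    intro cw
    simp only [List.foldl_nil, pvColOf, List.map_nil, List.append_nil,
      PySem.List.pySetD_natCast, PySem.List.pyGetD_natCast]
    by_cases h : n < cw.length
    · rw [List.getD_eq_getElem _ _ h, List.set_getElem_self]
    · rw [List.set_eq_of_length_le (by omega)]
  | cons r rs ih =>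
    intro cw
    rw [List.foldl_cons, ih]
    simp only [pvColOf, List.map_cons, PySem.List.pySetD_natCast, PySem.List.pyGetD_natCast]
    by_cases h : n < cw.length
    · rw [List.getD_eq_getElem (cw.set n _) _ (by simpa using h), List.getElem_set_self,
          List.set_set, List.getD_eq_getElem _ _ h]
      simp
    · have h' : cw.length ≤ n := by omega
      simp [List.set_eq_of_length_le h']

-- helpers for the table surgery at the border between prefix and suffix
theorem pv_getD_append_len {α : Type} (pre : List α) (x : α) (rest : List α) (d : α) :
    (pre ++ x :: rest).getD pre.length d = x := by
  rw [List.getD_eq_getElem _ _ (by simp)]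
  simp

theorem pv_set_append_len {α : Type} (pre : List α) (x : α) (rest : List α) (v : α) :
    (pre ++ x :: rest).set pre.length v = pre ++ v :: rest := by
  induction pre with
  | nil => simp
  | cons p ps ih => simp [ih]

-- the outer i-loop turns the table of empty slots into the list of columns
theorem pv_tableSpec (m : List (List String)) (w : Nat) :
    ∀ ext : List (List String),
      (PySem.List.pyRange 0 (w : Int) 1).foldl (fun cw i =>
          PySem.List.pySetD cw i (PySem.List.pyGetD cw i [] ++ pvColOf m i))
        (List.replicate w ([] : List String) ++ ext)
      = (List.range w).map (fun (k : Nat) => pvColOf m (k : Int)) ++ ext := by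
  induction w with
  | zero => intro ext; simp [PySem.List.pyRange_one_eq_nil]
  | succ w ih =>
    intro ext
    have hsplit : PySem.List.pyRange 0 ((w : Int) + 1) 1
        = PySem.List.pyRange 0 (w : Int) 1 ++ [(w : Int)] :=
      PySem.List.pyRange_one_succ_right (by omega)
    have hrep : List.replicate (w + 1) ([] : List String) ++ ext
        = List.replicate w ([] : List String) ++ ([] :: ext) := by
      rw [List.replicate_succ']; simp
    have h1 : ∀ (pre : List (List String)), pre.length = w → ∀ ext' : List (List String),
        (pre ++ ([] : List String) :: ext').set w
          ((pre ++ ([] : List String) :: ext').getD w [] ++ pvColOf m (w : Int))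
        = pre ++ pvColOf m (w : Int) :: ext' := by
      intro pre hp ext'
      subst hp
      rw [pv_getD_append_len, pv_set_append_len]
      simp
    push_cast
    rw [hsplit, List.foldl_append, hrep, ih ([] :: ext)]
    simp only [List.foldl_cons, List.foldl_nil,
      PySem.List.pySetD_natCast, PySem.List.pyGetD_natCast]
    rw [h1 _ (by simp) ext, List.range_succ]
    simp

theorem pv_eq (a_matrix : List (List String)) :
    get_column_words a_matrix = get_column_words_alt a_matrix := by
  unfold get_column_words get_column_words_alt
  dsimp only
  generalize (PySem.List.pyGetD a_matrix 0 []).length = w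
  -- B side: the peel loop is pvPeel, which is the column-major flatMap
  rw [pv_foldl_peel, PySem.List.length_pyRange_one]
  have hw : ((w : Int) - 0).toNat = w := by omega
  rw [hw, pv_peel_flatMap, List.nil_append]
  -- A side: rewrite each outer-loop step (inner loop) as a single table update
  have hcong :
      (PySem.List.pyRange 0 (w : Int) 1).foldl (fun cw i =>
          (PySem.List.pyRange 0 (a_matrix.length : Int) 1).foldl (fun cw j =>
            PySem.List.pySetD cw i
              (PySem.List.pyGetD cw i [] ++
                [PySem.List.pyGetD (PySem.List.pyGetD a_matrix j []) i ""])) cw)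
        ((PySem.List.pyRange 0 (w : Int) 1).map (fun _ => []))
      = (PySem.List.pyRange 0 (w : Int) 1).foldl (fun cw i =>
          PySem.List.pySetD cw i (PySem.List.pyGetD cw i [] ++ pvColOf a_matrix i))
        ((PySem.List.pyRange 0 (w : Int) 1).map (fun _ => [])) := by
    apply PySem.List.foldl_congr_mem
    intro acc i hi
    rw [PySem.List.foldl_pyRange_zero_pyGetD' a_matrix []
      (fun acc row => PySem.List.pySetD acc i
        (PySem.List.pyGetD acc i [] ++ [PySem.List.pyGetD row i ""]))]
    obtain ⟨h0, _⟩ := (PySem.List.mem_pyRange_one).1 hi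
    obtain ⟨n, rfl⟩ : ∃ n : Nat, i = (n : Int) := ⟨i.toNat, (Int.toNat_of_nonneg h0).symm⟩
    exact pv_innerSpec a_matrix n acc
  -- the initial table is w empty slots
  have hinit : (PySem.List.pyRange 0 (w : Int) 1).map (fun _ => ([] : List String))
      = List.replicate w ([] : List String) ++ [] := by
    simp [PySem.List.length_pyRange_one]
  rw [hcong, hinit, pv_tableSpec a_matrix w [],
      PySem.List.foldl_append_eq_flatMap, List.nil_append, List.append_nil]
  -- A's final flatMap indexes the table of columns; identify it with B's flatMap
  rw [PySem.List.pyRange_one, hw, List.flatMap_map]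
  apply List.flatMap_congr
  intro k hk
  have hkw : k < w := List.mem_range.1 hk
  simp only [Int.zero_add, PySem.List.pyGetD_natCast]
  rw [List.getD_eq_getElem _ _ (by simpa using hkw)]
  simp

-- ===== VERDICT (by name: the statement is the Claim_ definition above) =====
theorem get_column_words_spec : Claim_equal_get_column_words := by
  intro a_matrix _ _
  unfold Spec_get_column_words
  exact pv_eq a_matrix
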